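-- pv_equiv track=rewrite | github.com/elkhaligy/LeetCode | 2. Medium/(10) Oct 2024/Week 2/4. 1942. The Number of the Smallest Unoccupied Chair.py | smallestChair_bruteforce
-- ===== SOURCE A (Python) =====
-- def smallestChair_bruteforce(times: list[list[int]], targetFriend: int) -> int:
--     n = len(times)
--     sorted_times = sorted(times, key = lambda tup: tup[0])
--     chairs = [0] * n
--
--     for time in sorted_times:
--         for i in range(n):
--             if chairs[i] <= time[0]:
--                 chairs[i] = time[1]
--                 if time == times[targetFriend]:
--                     return i
--                 break
--
--     return 0
-- ===== SOURCE B (Python) =====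
-- def smallestChair_bruteforce(times: list[list[int]], targetFriend: int) -> int:
--     # Event simulation with an explicit occupied/free partition: chairs carry a
--     # release time (initially 0), released chairs move to a free pool, and each
--     # arriving friend takes the smallest free chair.
--     n = len(times)
--     target = times[targetFriend]
--     occ = [(0, i) for i in range(n)]   # (release_time, chair)
--     free: list[int] = []
--     for time in sorted(times, key=lambda t: t[0]):
--         arrival = time[0]
--         still = []
--         for rel, c in occ:
--             if rel <= arrival:
--                 free.append(c)
--             else:
--                 still.append((rel, c))
--         occ = still
--         free.sort()
--         if free:
--             chair = free.pop(0)
--             occ.append((time[1], chair))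
--             if time == target:
--                 return chair
--     return 0
-- ===== Notes on version B (the rewrite author's own statement) =====
-- stated objective: alternative
-- what changed: A scans a per-chair release-time array for the first free chair on every arrival; B keeps an explicit occupied/free partition of the chairs, moves released chairs into a free pool as each arrival is processed, and seats the friend on the smallest free chair.
-- outside the precondition, e.g. on smallestChair_bruteforce([], 0): A returns 0, B raises IndexError; on smallestChair_bruteforce([[-1]], 0): A returns 0, B returns 0
import Mathlib
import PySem

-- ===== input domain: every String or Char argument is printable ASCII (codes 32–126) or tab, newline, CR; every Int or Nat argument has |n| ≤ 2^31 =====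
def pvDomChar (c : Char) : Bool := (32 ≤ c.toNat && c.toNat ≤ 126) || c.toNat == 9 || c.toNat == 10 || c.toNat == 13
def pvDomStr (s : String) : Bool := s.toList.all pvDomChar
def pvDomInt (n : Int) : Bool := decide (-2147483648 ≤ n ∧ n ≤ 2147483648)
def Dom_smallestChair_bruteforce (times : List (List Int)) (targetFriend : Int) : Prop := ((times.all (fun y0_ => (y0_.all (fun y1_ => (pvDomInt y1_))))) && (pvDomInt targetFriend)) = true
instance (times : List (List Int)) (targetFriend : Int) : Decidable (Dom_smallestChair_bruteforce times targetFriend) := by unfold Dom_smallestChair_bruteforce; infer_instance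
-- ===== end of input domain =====

-- B replaces A's per-friend linear scan of a release-time array by an explicit
-- occupied/free chair partition (release events + smallest free chair); same values, alternative structure.

-- ===== PORT A =====
-- t[0], the sort key and arrival time (in range under Pre_, which demands length ≥ 2)
def pvKey (t : List Int) : Int := PySem.List.pyGetD t 0 0

-- inner loop: first chair index i with chairs[i] <= a
def pvFindChair (chairs : List Int) (a : Int) (i : Nat) : Option Nat :=
  match chairs with
  | [] => none
  | c :: cs => if c ≤ a then some i else pvFindChair cs a (i + 1)

-- outer loop over sorted_times; target = times[targetFriend] (evaluated eagerly; equal under Pre_)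
def pvALoop (ts : List (List Int)) (chairs : List Int) (target : List Int) : Int :=
  match ts with
  | [] => 0
  | t :: rest =>
    match pvFindChair chairs (pvKey t) 0 with
    | none => pvALoop rest chairs target
    | some i =>
      let chairs' := chairs.set i (PySem.List.pyGetD t 1 0)
      if t = target then (i : Int) else pvALoop rest chairs' target

def smallestChair_bruteforce (times : List (List Int)) (targetFriend : Int) : Int :=
  let n := times.length
  let sorted_times := PySem.List.sorted times (fun t => pvKey t) false
  pvALoop sorted_times (List.replicate n (0 : Int)) (PySem.List.pyGetD times targetFriend [])

-- ===== PORT B =====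
-- outer loop over sorted times; occ = (release_time, chair) pairs, free = released chairs
def pvBLoop (ts : List (List Int)) (occ : List (Int × Int)) (free : List Int) (target : List Int) : Int :=
  match ts with
  | [] => 0
  | t :: rest =>
    let a := pvKey t
    let freed := (occ.filter (fun p => p.1 ≤ a)).map (fun p => p.2)
    let occ' := occ.filter (fun p => ¬ p.1 ≤ a)
    match PySem.List.sorted (free ++ freed) (fun c => c) false with
    | [] => pvBLoop rest occ' [] target
    | c :: fs =>
      if t = target then c
      else pvBLoop rest (occ' ++ [(PySem.List.pyGetD t 1 0, c)]) fs target

def smallestChair_bruteforce_alt (times : List (List Int)) (targetFriend : Int) : Int :=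
  let n := times.length
  let target := PySem.List.pyGetD times targetFriend []
  let occ := (List.range n).map (fun i : Nat => ((0 : Int), (i : Int)))
  pvBLoop (PySem.List.sorted times (fun t => pvKey t) false) occ [] target

-- ===== PRECONDITION & SPEC =====
-- Pre_ excludes inputs where an inner list shorter than 2 or an out-of-range targetFriend
-- makes time[0]/time[1]/times[targetFriend] raise IndexError; on the rare such inputs where the
-- faulty access is never reached A still returns 0 (B raises on ([],0), agrees on ([[-1]],0)).
def Pre_smallestChair_bruteforce (times : List (List Int)) (targetFriend : Int) : Prop :=
  (∀ t ∈ times, 2 ≤ t.length) ∧ PySem.Raise.InRange times.length targetFriend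
instance (times : List (List Int)) (targetFriend : Int) : Decidable (Pre_smallestChair_bruteforce times targetFriend) := by unfold Pre_smallestChair_bruteforce; infer_instance

def pvWitness_smallestChair_bruteforce : List (List Int) × Int := ([[3, 10], [1, 5], [2, 6]], 0)

def Spec_smallestChair_bruteforce (times : List (List Int)) (targetFriend : Int) (out : Int) : Prop := out = smallestChair_bruteforce_alt times targetFriend
instance (times : List (List Int)) (targetFriend : Int) (out : Int) : Decidable (Spec_smallestChair_bruteforce times targetFriend out) := by unfold Spec_smallestChair_bruteforce; infer_instance

-- ===== CLAIM (what is proved, stated in full; the proofs are below) =====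
def Claim_equal_smallestChair_bruteforce : Prop := ∀ (times : List (List Int)) (targetFriend : Int), Dom_smallestChair_bruteforce times targetFriend → Pre_smallestChair_bruteforce times targetFriend → Spec_smallestChair_bruteforce times targetFriend (smallestChair_bruteforce times targetFriend)

-- ===== LEMMAS AND PROOFS =====

-- characterisation of A's inner scan
theorem pvFindChair_none (chairs : List Int) (a : Int) (k : Nat) :
    pvFindChair chairs a k = none ↔ ∀ j < chairs.length, ¬ chairs.getD j 0 ≤ a := by
  induction chairs generalizing k with
  | nil => simp [pvFindChair]
  | cons c cs ih =>
    simp only [pvFindChair]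
    split_ifs with hc
    · simp only [List.length_cons]
      constructor
      · intro h; cases h
      · intro h; exact absurd hc (by simpa using h 0 (by omega))
    · rw [ih]
      constructor
      · intro h j hj
        cases j with
        | zero => simpa using hc
        | succ j => exact h j (by simpa using hj)
      · intro h j hj
        exact h (j+1) (by simpa using hj)

theorem pvFindChair_some (chairs : List Int) (a : Int) (k : Nat) (i : Nat) :
    pvFindChair chairs a k = some i ↔
      ∃ m, i = k + m ∧ m < chairs.length ∧ chairs.getD m 0 ≤ a ∧
        ∀ j < m, ¬ chairs.getD j 0 ≤ a := by
  induction chairs generalizing k i with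
  | nil => simp [pvFindChair]
  | cons c cs ih =>
    simp only [pvFindChair]
    split_ifs with hc
    · constructor
      · intro h
        refine ⟨0, by simpa using h.symm, by simp, by simpa using hc, by simp⟩
      · rintro ⟨m, hi, hm, hv, hmin⟩
        cases m with
        | zero => simp [hi]
        | succ m => exact absurd hc (by simpa using hmin 0 (by omega))
    · rw [ih]
      constructor
      · rintro ⟨m, hi, hm, hv, hmin⟩
        refine ⟨m + 1, by omega, by simpa using hm, by simpa using hv, ?_⟩
        intro j hj
        cases j with
        | zero => simpa using hc
        | succ j => exact hmin j (by omega)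
      · rintro ⟨m, hi, hm, hv, hmin⟩
        cases m with
        | zero => exact absurd hc (by simpa using hv)
        | succ m =>
          refine ⟨m, by omega, by simpa using hm, by simpa using hv, ?_⟩
          intro j hj
          exact hmin (j+1) (by simpa using hj)

-- the invariant tying A's release-time array to B's occupied/free partition
def pvInv (S : List (List Int)) (chairs : List Int) (occ : List (Int × Int)) (free : List Int) : Prop :=
  (free ++ occ.map (fun p => p.2)).Perm ((List.range chairs.length).map (fun i : Nat => (i : Int))) ∧
  (∀ c ∈ free, 0 ≤ c ∧ ∀ t ∈ S, chairs.getD c.toNat 0 ≤ pvKey t) ∧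
  (∀ p ∈ occ, 0 ≤ p.2 ∧ chairs.getD p.2.toNat 0 = p.1)

theorem pvRangeCastNodup (n : Nat) : ((List.range n).map (fun i : Nat => (i : Int))).Nodup := by
  refine List.Nodup.map ?_ List.nodup_range
  intro x y h; simpa using h

theorem pv_loop_eq (target : List Int) (S : List (List Int)) :
    ∀ (chairs : List Int) (occ : List (Int × Int)) (free : List Int),
    S.Pairwise (fun x y => pvKey x ≤ pvKey y) →
    pvInv S chairs occ free →
    pvALoop S chairs target = pvBLoop S occ free target := by
  induction S with
  | nil => intro chairs occ free _ _; rfl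
  | cons t rest ih =>
    intro chairs occ free hsort hinv
    obtain ⟨hperm, hfree, hocc⟩ := hinv
    have hsort_head : ∀ t' ∈ rest, pvKey t ≤ pvKey t' := (List.pairwise_cons.mp hsort).1
    have hsort_rest := (List.pairwise_cons.mp hsort).2
    set a := pvKey t with ha
    set freed := (occ.filter (fun p => decide (p.1 ≤ a))).map (fun p => p.2) with hfreed
    set occ' := occ.filter (fun p => decide (¬ p.1 ≤ a)) with hocc'
    have hsplit : (freed ++ occ'.map (fun p => p.2)).Perm (occ.map (fun p => p.2)) := by
      rw [hfreed, hocc', ← List.map_append]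
      refine List.Perm.map _ ?_
      have h := List.filter_append_perm (fun p : Int × Int => decide (p.1 ≤ a)) occ
      simp only [decide_not]
      exact h
    have hperm2 : (free ++ (freed ++ occ'.map (fun p => p.2))).Perm
        ((List.range chairs.length).map (fun i : Nat => (i : Int))) :=
      ((List.Perm.append_left free hsplit)).trans hperm
    have hnd : (free ++ (freed ++ occ'.map (fun p => p.2))).Nodup :=
      (hperm2.nodup_iff).mpr (pvRangeCastNodup chairs.length)
    have hmem : ∀ c : Int, c ∈ free ++ freed ↔
        ∃ j : Nat, j < chairs.length ∧ c = (j : Int) ∧ chairs.getD j 0 ≤ a := by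
      intro c
      constructor
      · intro hc
        have hc' : c ∈ free ++ occ.map (fun p => p.2) := by
          rcases List.mem_append.mp hc with h | h
          · exact List.mem_append.mpr (Or.inl h)
          · rcases List.mem_map.mp h with ⟨p, hp, hpc⟩
            exact List.mem_append.mpr (Or.inr (List.mem_map.mpr
              ⟨p, (List.mem_filter.mp hp).1, hpc⟩))
        rcases List.mem_map.mp (hperm.subset hc') with ⟨j, hj, hjc⟩
        subst hjc
        refine ⟨j, List.mem_range.mp hj, rfl, ?_⟩
        rcases List.mem_append.mp hc with h | h
        · have h2 := (hfree _ h).2 t (by simp)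
          simpa using h2
        · rcases List.mem_map.mp h with ⟨p, hp, hpc⟩
          have hpo := List.mem_filter.mp hp
          have h2 := (hocc p hpo.1).2
          have hle : p.1 ≤ a := by simpa using hpo.2
          rw [hpc] at h2
          have h3 : chairs.getD ((j : Int)).toNat 0 ≤ a := h2.le.trans hle
          simpa using h3
      · rintro ⟨j, hj, rfl, hle⟩
        have hjm : (j : Int) ∈ free ++ occ.map (fun p => p.2) :=
          hperm.symm.subset (List.mem_map.mpr ⟨j, List.mem_range.mpr hj, rfl⟩)
        rcases List.mem_append.mp hjm with h | h
        · exact List.mem_append.mpr (Or.inl h)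
        · rcases List.mem_map.mp h with ⟨p, hp, hpj⟩
          have h2 := (hocc p hp).2
          rw [hpj] at h2
          refine List.mem_append.mpr (Or.inr (List.mem_map.mpr
            ⟨p, List.mem_filter.mpr ⟨hp, ?_⟩, hpj⟩))
          simp only [decide_eq_true_eq]
          rw [← h2]
          simpa using hle
    simp only [pvALoop, pvBLoop]
    rw [← ha, ← hfreed, ← hocc']
    cases hfind : pvFindChair chairs a 0 with
    | none =>
      have hno := (pvFindChair_none chairs a 0).mp hfind
      have hempty : free ++ freed = [] := by
        rcases h : free ++ freed with _ | ⟨c, l⟩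
        · rfl
        · exfalso
          have : c ∈ free ++ freed := by rw [h]; exact List.mem_cons_self
          rcases (hmem c).mp this with ⟨j, hj, _, hle⟩
          exact hno j hj hle
      rcases List.append_eq_nil_iff.mp hempty with ⟨hfe, hfde⟩
      have hocc_eq : occ' = occ := by
        rw [hocc']
        refine List.filter_eq_self.mpr ?_
        intro p hp
        simp only [decide_eq_true_eq]
        intro hle
        have : p.2 ∈ freed := by
          rw [hfreed]
          exact List.mem_map.mpr ⟨p, List.mem_filter.mpr ⟨hp, by simpa using hle⟩, rfl⟩
        rw [hfde] at this
        cases this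
      rw [hfe, hfde]
      have hsorted_nil : PySem.List.sorted ([] ++ [] : List Int) (fun c => c) false = [] := rfl
      rw [hsorted_nil, hocc_eq]
      exact ih chairs occ [] hsort_rest
        ⟨by simpa [hfe] using hperm, by simp, fun p hp => ⟨(hocc p hp).1, (hocc p hp).2⟩⟩
    | some i =>
      rcases (pvFindChair_some chairs a 0 i).mp hfind with ⟨m, him, hmlen, hmle, hmin⟩
      have him' : i = m := by omega
      subst him'
      have hiM : (i : Int) ∈ free ++ freed := (hmem _).mpr ⟨i, hmlen, rfl, hmle⟩
      cases hL : PySem.List.sorted (free ++ freed) (fun c => c) false with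
      | nil =>
        exfalso
        have : (i : Int) ∈ PySem.List.sorted (free ++ freed) (fun c => c) false :=
          (PySem.List.mem_sorted (free ++ freed) (fun c => c) false _).mpr hiM
        rw [hL] at this
        cases this
      | cons c fs =>
        have hLperm : (c :: fs).Perm (free ++ freed) := by
          rw [← hL]; exact PySem.List.sorted_perm (free ++ freed) (fun c => c) false
        have hcmem : c ∈ free ++ freed := hLperm.subset List.mem_cons_self
        have hchead : ∀ y ∈ free ++ freed, c ≤ y := by
          have := PySem.List.key_head_sorted_le (free ++ freed) (fun c : Int => c) hL
          simpa using this
        have hci : c = (i : Int) := by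
          refine le_antisymm (hchead _ hiM) ?_
          rcases (hmem c).mp hcmem with ⟨j, hj, rfl, hle⟩
          have : i ≤ j := not_lt.mp (fun hlt => hmin j hlt hle)
          exact_mod_cast this
        by_cases ht : t = target
        · simp only [ht, if_pos, hci]
        · simp only [if_neg ht]
          -- nodup bookkeeping
          have hndA : ((free ++ freed) ++ occ'.map (fun p => p.2)).Nodup := by
            simpa [List.append_assoc] using hnd
          have hndff : (free ++ freed).Nodup := hndA.sublist (List.sublist_append_left _ _)
          have hndL : (c :: fs).Nodup := (hLperm.nodup_iff).mpr hndff
          have hcfs : c ∉ fs := (List.nodup_cons.mp hndL).1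
          have hdisj : List.Disjoint (free ++ freed) (occ'.map (fun p => p.2)) :=
            List.disjoint_of_nodup_append hndA
          set v := PySem.List.pyGetD t 1 0 with hv
          refine ih _ _ _ hsort_rest ⟨?_, ?_, ?_⟩
          · -- the chair multiset is preserved
            have h1 : ((c :: fs) ++ occ'.map (fun p => p.2)).Perm
                ((List.range chairs.length).map (fun i : Nat => (i : Int))) :=
              (List.Perm.append_right _ hLperm).trans (by simpa [List.append_assoc] using hperm2)
            have h2 : (fs ++ (occ'.map (fun p => p.2) ++ [c])).Perm
                (c :: (fs ++ occ'.map (fun p => p.2))) := by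
              rw [← List.append_assoc]
              exact List.perm_append_singleton _ _
            have h3 : (fs ++ (occ'.map (fun p => p.2) ++ [c])).Perm
                ((List.range (chairs.set i v).length).map (fun i : Nat => (i : Int))) := by
              refine h2.trans ?_
              simpa using h1
            simpa using h3
          · -- free chairs stay available for every later arrival
            intro c' hc'
            have hc'L : c' ∈ free ++ freed := hLperm.subset (List.mem_cons_of_mem _ hc')
            rcases (hmem c').mp hc'L with ⟨j, hj, rfl, hle⟩
            have hne : ((j : Nat) : Int) ≠ c := fun he => hcfs (he ▸ hc')
            have hjne : j ≠ i := by
              intro he; exact hne (by rw [he, hci])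
            refine ⟨by exact_mod_cast Nat.zero_le j, ?_⟩
            intro t' ht'
            have hgd : (chairs.set i v).getD ((j : Int)).toNat 0 = chairs.getD j 0 := by
              rw [Int.toNat_natCast, List.getD_eq_getElem?_getD, List.getD_eq_getElem?_getD,
                List.getElem?_set_ne (by omega)]
            rw [hgd]
            exact hle.trans (hsort_head t' ht')
          · -- occupied chairs keep their recorded release time
            intro p hp
            rcases List.mem_append.mp hp with hpo | hps
            · have hpocc : p ∈ occ := List.mem_of_mem_filter hpo
              have h0 := (hocc p hpocc).1
              have h2 := (hocc p hpocc).2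
              have hne : p.2 ≠ (i : Int) := by
                rw [← hci]
                intro he
                exact hdisj hcmem (he ▸ List.mem_map.mpr ⟨p, hpo, rfl⟩)
              refine ⟨h0, ?_⟩
              have hjne : p.2.toNat ≠ i := by omega
              rw [List.getD_eq_getElem?_getD, List.getElem?_set_ne (by omega),
                ← List.getD_eq_getElem?_getD]
              exact h2
            · have hps' : p = (v, c) := by simpa using hps
              subst hps'
              refine ⟨by simp [hci], ?_⟩
              simp only [hci]
              rw [Int.toNat_natCast, List.getD_eq_getElem?_getD,
                List.getElem?_set_self (by omega)]
              rfl
  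

theorem smallestChair_bruteforce_spec : Claim_equal_smallestChair_bruteforce := by
  intro times targetFriend _hdom hpre
  unfold Spec_smallestChair_bruteforce
  unfold smallestChair_bruteforce smallestChair_bruteforce_alt
  refine pv_loop_eq _ _ _ _ _ (PySem.List.sorted_pairwise times (fun t => pvKey t)) ?_
  refine ⟨?_, by simp, ?_⟩
  · simp only [List.nil_append, List.map_map, List.length_replicate]
    have : ((fun p : Int × Int => p.2) ∘ fun i : Nat => ((0 : Int), (i : Int))) = fun i : Nat => (i : Int) := rfl
    rw [this]
  · intro p hp
    rcases List.mem_map.mp hp with ⟨j, hj, rfl⟩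
    refine ⟨by simp, ?_⟩
    simp [List.getD_eq_getElem?_getD, List.getElem?_replicate]
    split <;> rfl
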